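-- pv_equiv track=rewrite | github.com/sueda-bas/Number-Board-Puzzle-A-Python-Based-Collect-Merge-Game | assignment3.py | spaces_to_n
-- ===== SOURCE A (Python) =====
-- def spaces_to_n(rows_list):
--     for row in rows_list:
--         n_indexes=[index for index, element in enumerate(row) if element==' ']
--         if n_indexes!=[]:
--             for index in n_indexes:
--                 row.pop(index)
--                 row.insert(index,"N")
--     return rows_list
-- ===== SOURCE B (Python) =====
-- def spaces_to_n(rows_list):
--     for row in rows_list:
--         for i, el in enumerate(row):
--             if el == ' ':
--                 row[i] = "N"
--     return rows_list
-- ===== Notes on version B (the rewrite author's own statement) =====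
-- stated objective: simpler
-- what changed: Replaces A's two-pass scheme (build the list of space positions, then pop+insert at each) with a single enumerate pass that assigns row[i] = 'N' in place; both mutate the given rows in place.
import Mathlib
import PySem

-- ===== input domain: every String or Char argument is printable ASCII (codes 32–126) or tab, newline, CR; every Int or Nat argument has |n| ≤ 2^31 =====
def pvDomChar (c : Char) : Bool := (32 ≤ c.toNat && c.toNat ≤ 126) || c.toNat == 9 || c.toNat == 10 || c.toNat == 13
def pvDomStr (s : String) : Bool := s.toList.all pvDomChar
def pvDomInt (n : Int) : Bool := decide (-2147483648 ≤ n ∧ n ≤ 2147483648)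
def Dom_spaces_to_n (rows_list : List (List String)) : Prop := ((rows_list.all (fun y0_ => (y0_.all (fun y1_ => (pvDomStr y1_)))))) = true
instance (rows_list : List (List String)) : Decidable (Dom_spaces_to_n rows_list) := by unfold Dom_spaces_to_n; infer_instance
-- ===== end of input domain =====

-- B replaces A's two passes per row (collect space positions, then pop+insert at each)
-- with one enumerate pass assigning row[i] = "N"; objective: simpler. Both Pythons mutate
-- the given row lists in place identically; the theorems are about the return value.

-- ===== PORT A =====
-- the pop/insert loop body; pop? cannot fail here (indices come from enumerate) but the
-- none branch keeps the definition total
def pvAStep (r : List String) (index : Int) : List String :=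
  match PySem.List.pop? r index with
  | some (_, r') => PySem.List.insert r' index "N"
  | none => r

def spaces_to_n (rows_list : List (List String)) : List (List String) :=
  rows_list.map (fun row =>
    let n_indexes := ((PySem.List.enumerate row 0).filter (fun p => p.2 == " ")).map (fun p => p.1)
    if n_indexes ≠ [] then n_indexes.foldl pvAStep row else row)

-- ===== PORT B =====
-- row[i] = "N": i comes from enumerate, so i ≥ 0 and .toNat is exact
def spaces_to_n_alt (rows_list : List (List String)) : List (List String) :=
  rows_list.map (fun row =>
    (PySem.List.enumerate row 0).foldl
      (fun r p => if p.2 == " " then r.set p.1.toNat "N" else r) row)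

-- ===== PRECONDITION & SPEC =====
def Spec_spaces_to_n (rows_list : List (List String)) (out : List (List String)) : Prop := out = spaces_to_n_alt rows_list
instance (rows_list : List (List String)) (out : List (List String)) : Decidable (Spec_spaces_to_n rows_list out) := by unfold Spec_spaces_to_n; infer_instance

-- ===== CLAIM (what is proved, stated in full; the proofs are below) =====
def Claim_equal_spaces_to_n : Prop := ∀ (rows_list : List (List String)), Dom_spaces_to_n rows_list → Spec_spaces_to_n rows_list (spaces_to_n rows_list)

-- ===== LEMMAS AND PROOFS =====

def pvRepl (el : String) : String := if el == " " then "N" else el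

theorem pv_set_mid (pre : List String) (x v : String) (xs : List String) :
    (pre ++ x :: xs).set pre.length v = pre ++ v :: xs := by
  induction pre with
  | nil => simp
  | cons a pre ih => simp [ih]

theorem pv_erase_mid (pre : List String) (x : String) (xs : List String) :
    (pre ++ x :: xs).eraseIdx pre.length = pre ++ xs := by
  induction pre with
  | nil => simp
  | cons a pre ih => simp [ih]

theorem pv_insert_mid (pre : List String) (v : String) (xs : List String) :
    PySem.List.insert (pre ++ xs) (pre.length : Int) v = pre ++ v :: xs := by
  rw [PySem.List.insert_natCast _ _ _ (by simp)]
  induction pre with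
  | nil => simp
  | cons a pre ih => simp

-- B's per-row fold, with an explicit processed prefix
theorem pv_alt_row (row : List String) : ∀ (pre : List String),
    (PySem.List.enumerate row (pre.length : Int)).foldl
      (fun r p => if p.2 == " " then r.set p.1.toNat "N" else r) (pre ++ row)
      = pre ++ row.map pvRepl := by
  induction row with
  | nil => simp [PySem.List.enumerate_nil]
  | cons x xs ih =>
    intro pre
    rw [PySem.List.enumerate_cons]
    simp only [List.foldl_cons]
    have h2 : ((pre.length : Int) + 1) = (((pre ++ [pvRepl x]).length : Nat) : Int) := by
      simp
    have hpre := ih (pre ++ [pvRepl x])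
    rw [List.append_assoc] at hpre
    simp only [List.singleton_append] at hpre
    by_cases hx : x == " "
    · have hrepl : pvRepl x = "N" := by simp [pvRepl, hx]
      rw [hrepl] at hpre h2
      rw [if_pos hx, show ((pre.length : Int)).toNat = pre.length from by simp,
        pv_set_mid, h2, hpre]
      simp [pvRepl, hx]
    · have hrepl : pvRepl x = x := by simp [pvRepl, hx]
      rw [hrepl] at hpre h2
      rw [if_neg hx, h2, hpre]
      simp [pvRepl, hx]

-- A's per-row fold, with an explicit processed prefix
theorem pv_a_row (row : List String) : ∀ (pre : List String),
    (((PySem.List.enumerate row (pre.length : Int)).filter (fun p => p.2 == " ")).map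
        (fun p => p.1)).foldl pvAStep (pre ++ row)
      = pre ++ row.map pvRepl := by
  induction row with
  | nil => simp [PySem.List.enumerate_nil]
  | cons x xs ih =>
    intro pre
    rw [PySem.List.enumerate_cons]
    have h2 : ((pre.length : Int) + 1) = (((pre ++ [pvRepl x]).length : Nat) : Int) := by
      simp
    have hpre := ih (pre ++ [pvRepl x])
    rw [List.append_assoc] at hpre
    simp only [List.singleton_append] at hpre
    by_cases hx : x == " "
    · have hlen : pre.length < (pre ++ x :: xs).length := by simp
      have hpop : PySem.List.pop? (pre ++ x :: xs) (pre.length : Int)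
          = some ((pre ++ x :: xs)[pre.length], (pre ++ x :: xs).eraseIdx pre.length) :=
        PySem.List.pop?_natCast _ _ hlen
      have hstep : pvAStep (pre ++ x :: xs) (pre.length : Int) = pre ++ "N" :: xs := by
        rw [pvAStep, hpop]
        simp only [pv_erase_mid]
        rw [pv_insert_mid]
      have hrepl : pvRepl x = "N" := by simp [pvRepl, hx]
      rw [hrepl] at hpre h2
      rw [show List.filter (fun p => p.2 == " ")
            (((pre.length : Int), x) :: PySem.List.enumerate xs ((pre.length : Int) + 1))
          = ((pre.length : Int), x) :: List.filter (fun p => p.2 == " ")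
            (PySem.List.enumerate xs ((pre.length : Int) + 1)) from by
            simp [hx],
        List.map_cons, List.foldl_cons, hstep, h2, hpre]
      simp [pvRepl, hx]
    · have hrepl : pvRepl x = x := by simp [pvRepl, hx]
      rw [hrepl] at hpre h2
      rw [show List.filter (fun p => p.2 == " ")
            (((pre.length : Int), x) :: PySem.List.enumerate xs ((pre.length : Int) + 1))
          = List.filter (fun p => p.2 == " ")
            (PySem.List.enumerate xs ((pre.length : Int) + 1)) from by
            simp [hx],
        h2, hpre]
      simp [pvRepl, hx]

theorem pv_row_eq (row : List String) :
    (let n_indexes := ((PySem.List.enumerate row 0).filter (fun p => p.2 == " ")).map (fun p => p.1)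
     if n_indexes ≠ [] then n_indexes.foldl pvAStep row else row)
    = (PySem.List.enumerate row 0).foldl
        (fun r p => if p.2 == " " then r.set p.1.toNat "N" else r) row := by
  have hA := pv_a_row row []
  have hB := pv_alt_row row []
  simp only [List.length_nil, Nat.cast_zero, List.nil_append] at hA hB
  rw [hB]
  by_cases h : ((PySem.List.enumerate row 0).filter (fun p => p.2 == " ")).map (fun p => p.1) = []
  · rw [h, List.foldl_nil] at hA
    simp only [h, ne_eq, not_true_eq_false, if_false]
    exact hA
  · simp only [ne_eq, h, not_false_eq_true, if_true]
    exact hA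

-- ===== VERDICT (by name: the statement is the Claim_ definition above) =====
theorem spaces_to_n_spec : Claim_equal_spaces_to_n := by
  intro rows_list _
  unfold Spec_spaces_to_n spaces_to_n spaces_to_n_alt
  exact List.map_congr_left (fun row _ => pv_row_eq row)
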